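-- pv_equiv track=rewrite | github.com/ChoneungSon/BeakJoon | 프로그래머스/5를이용한연산.py | solution
-- ===== SOURCE A (Python) =====
-- def solution(N, number):
--     mknums, cnt = [5], 1
--     while cnt <= 8:
--         cand = []
--         for i in range(len(mknums)):
--             if mknums[i] + 5 == number: return cnt
--             elif mknums[i] + 5 in cand or mknums[i] + 5 in mknums: pass
--             else: cand.append(mknums[i] + 5)
--             if mknums[i] - 5 == number: return cnt
--             elif mknums[i] - 5 in cand or mknums[i] - 5 in mknums or mknums[i] - 5 < 0 : pass
--             else: cand.append(mknums[i] - 5)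
--             if mknums[i] * 5 == number: return cnt
--             elif mknums[i] * 5 in cand or mknums[i] * 5 in mknums: pass
--             else: cand.append(mknums[i] * 5)
--             if mknums[i] // 5 == number: return cnt
--             elif mknums[i] // 5 in cand or mknums[i] // 5 in mknums: pass
--             else: cand.append(mknums[i] // 5)
--         if int(f'{N}'*cnt) == number: return cnt
--         else: cand.append(int(f'{N}'*cnt))
--         mknums += cand
--         cnt += 1
--     return -1
-- ===== SOURCE B (Python) =====
-- def solution(N, number):
--     visited = {5}
--     frontier = [5]
--     for cnt in range(1, 9):
--         nxt = []
--         for x in frontier: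
--             if number in (x + 5, x - 5, x * 5, x // 5):
--                 return cnt
--             for y in (x + 5, x * 5, x // 5):
--                 if y not in visited:
--                     visited.add(y)
--                     nxt.append(y)
--             if x - 5 >= 0 and x - 5 not in visited:
--                 visited.add(x - 5)
--                 nxt.append(x - 5)
--         r = int(str(N) * cnt)
--         if r == number:
--             return cnt
--         if r not in visited:
--             visited.add(r)
--             nxt.append(r)
--         frontier = nxt
--     return -1
-- ===== Notes on version B (the rewrite author's own statement) =====
-- stated objective: faster
-- what changed: B replaces A's level loop that rescans the ENTIRE list of discovered numbers every round (with O(M) list-membership tests inside) by a standard frontier BFS: a visited hash set plus a per-level frontier, so each node's four successors are generated exactly once with O(1) set lookups.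
import Mathlib
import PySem

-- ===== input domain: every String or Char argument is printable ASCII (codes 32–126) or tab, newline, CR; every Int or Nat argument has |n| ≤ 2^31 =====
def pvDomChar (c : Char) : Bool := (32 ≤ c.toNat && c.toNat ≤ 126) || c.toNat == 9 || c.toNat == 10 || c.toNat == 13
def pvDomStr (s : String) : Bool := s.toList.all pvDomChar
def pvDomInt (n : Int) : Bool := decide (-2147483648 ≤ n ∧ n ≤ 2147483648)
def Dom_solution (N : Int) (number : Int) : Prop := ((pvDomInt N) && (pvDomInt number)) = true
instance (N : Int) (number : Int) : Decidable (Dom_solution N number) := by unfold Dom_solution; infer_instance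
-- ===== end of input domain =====

-- B replaces A's rescan-everything level loop by a frontier BFS over a visited set (measured faster).

-- ===== PORT A =====

-- int(f'{N}'*cnt): Python string repetition is cnt-fold concatenation; none = ValueError
def repdigit? (N : Int) (cnt : Nat) : Option Int :=
  PySem.Int.ofStr? (PySem.Str.join "" (List.replicate cnt (PySem.Int.toStr N)))

-- A's inner `for i in range(len(mknums))` loop; `none` = one of the `return cnt` fired
def aScan (number : Int) (mknums : List Int) (rest : List Int) (cand : List Int) : Option (List Int) :=
  match rest with
  | [] => some cand
  | x :: rs =>
    if x + 5 = number then none else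
    let c1 := if x + 5 ∈ cand ∨ x + 5 ∈ mknums then cand else cand ++ [x + 5]
    if x - 5 = number then none else
    let c2 := if x - 5 ∈ c1 ∨ x - 5 ∈ mknums ∨ x - 5 < 0 then c1 else c1 ++ [x - 5]
    if x * 5 = number then none else
    let c3 := if x * 5 ∈ c2 ∨ x * 5 ∈ mknums then c2 else c2 ++ [x * 5]
    if PySem.Int.floordiv x 5 = number then none else
    let c4 := if PySem.Int.floordiv x 5 ∈ c3 ∨ PySem.Int.floordiv x 5 ∈ mknums then c3
              else c3 ++ [PySem.Int.floordiv x 5]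
    aScan number mknums rs c4

-- A's `while cnt <= 8` loop; fuel = remaining iterations (8 at cnt = 1)
def aLoop (N : Int) (number : Int) (fuel : Nat) (cnt : Nat) (mknums : List Int) : Int :=
  match fuel with
  | 0 => -1
  | f + 1 =>
    match aScan number mknums mknums [] with
    | none => (cnt : Int)
    | some cand =>
      match repdigit? N cnt with
      | none => 0   -- Python raises ValueError here; excluded by Pre_solution
      | some r =>
        if r = number then (cnt : Int)
        else aLoop N number f (cnt + 1) (mknums ++ (cand ++ [r]))

def solution (N : Int) (number : Int) : Int := aLoop N number 8 1 [5]

-- ===== PORT B =====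

-- body of `for y in (x+5, x*5, x//5): if y not in visited: visited.add(y); nxt.append(y)`
def bGrow (st : PySem.Set Int × List Int) (y : Int) : PySem.Set Int × List Int :=
  if y ∈ st.1 then st else (PySem.Set.add st.1 y, st.2 ++ [y])

-- B's `for x in frontier:` loop; `none` = `return cnt` fired
def bScan (number : Int) (frontier : List Int) (visited : PySem.Set Int) (nxt : List Int) :
    Option (PySem.Set Int × List Int) :=
  match frontier with
  | [] => some (visited, nxt)
  | x :: xs =>
    if number = x + 5 ∨ number = x - 5 ∨ number = x * 5 ∨ number = PySem.Int.floordiv x 5 then none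
    else
      let st := [x + 5, x * 5, PySem.Int.floordiv x 5].foldl bGrow (visited, nxt)
      let st2 := if 0 ≤ x - 5 ∧ x - 5 ∉ st.1 then (PySem.Set.add st.1 (x - 5), st.2 ++ [x - 5]) else st
      bScan number xs st2.1 st2.2

-- B's `for cnt in range(1, 9)` loop
def bLoop (N : Int) (number : Int) (fuel : Nat) (cnt : Nat) (visited : PySem.Set Int)
    (frontier : List Int) : Int :=
  match fuel with
  | 0 => -1
  | f + 1 =>
    match bScan number frontier visited [] with
    | none => (cnt : Int)
    | some vn =>
      match repdigit? N cnt with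
      | none => 0   -- Source B raises ValueError here too; excluded by Pre_solution
      | some r =>
        if r = number then (cnt : Int)
        else bLoop N number f (cnt + 1)
          (if r ∈ vn.1 then vn.1 else PySem.Set.add vn.1 r)
          (if r ∈ vn.1 then vn.2 else vn.2 ++ [r])

def solution_alt (N : Int) (number : Int) : Int :=
  bLoop N number 8 1 (PySem.Set.ofList [5]) [5]

-- ===== PRECONDITION & SPEC =====

-- Exactly the inputs on which Python A returns: for N < 0, int(str(N)*2) raises ValueError at cnt = 2,
-- unless a `return cnt` fires first — at level 1 (successors of 5, or repdigit N itself) or during the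
-- level-2 scan of [5, 10, 0, 25, 1, N] (which runs before the failing parse). Nothing else is excluded.
def Pre_solution (N : Int) (number : Int) : Prop :=
  0 ≤ N ∨ number ∈ ([10, 0, 25, 1, N] : List Int) ∨
    number ∈ ([15, 5, 50, 2, -5, 0, -4, 6, 30, 20, 125,
               N + 5, N - 5, N * 5, PySem.Int.floordiv N 5] : List Int)
instance (N : Int) (number : Int) : Decidable (Pre_solution N number) := by
  unfold Pre_solution; infer_instance

def pvWitness_solution : Int × Int := (5, 11)

def Spec_solution (N : Int) (number : Int) (out : Int) : Prop := out = solution_alt N number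
instance (N : Int) (number : Int) (out : Int) : Decidable (Spec_solution N number out) := by
  unfold Spec_solution; infer_instance

-- ===== CLAIM (what is proved, stated in full; the proofs are below) =====
def Claim_equal_solution : Prop := ∀ (N : Int) (number : Int), Dom_solution N number →
  Pre_solution N number → Spec_solution N number (solution N number)

-- ===== LEMMAS AND PROOFS =====

-- one of A's four `return cnt` tests fires at x
def hitB (number x : Int) : Prop :=
  x + 5 = number ∨ x - 5 = number ∨ x * 5 = number ∨ PySem.Int.floordiv x 5 = number

-- y is a successor of x that the programs may record (x-5 only when non-negative)
def adm (x y : Int) : Prop :=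
  y = x + 5 ∨ y = x * 5 ∨ y = PySem.Int.floordiv x 5 ∨ (y = x - 5 ∧ 0 ≤ x - 5)

-- the invariant tying A's state to B's: same discovered set, frontier ⊆ visited,
-- and every non-frontier node is saturated (no hit; all successors already discovered)
def StInv (number : Int) (mknums : List Int) (visited : List Int) (frontier : List Int) : Prop :=
  (∀ y, y ∈ mknums ↔ y ∈ visited) ∧
  (∀ y ∈ frontier, y ∈ visited) ∧
  (∀ x ∈ visited, x ∉ frontier → ¬ hitB number x ∧ ∀ y, adm x y → y ∈ visited)

lemma aLoop_succ (N number : Int) (f cnt : Nat) (mk : List Int) :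
    aLoop N number (f + 1) cnt mk =
      (match aScan number mk mk [] with
       | none => (cnt : Int)
       | some cand =>
         match repdigit? N cnt with
         | none => 0
         | some r =>
           if r = number then (cnt : Int)
           else aLoop N number f (cnt + 1) (mk ++ (cand ++ [r]))) := rfl

lemma bLoop_succ (N number : Int) (f cnt : Nat) (vis : PySem.Set Int) (fr : List Int) :
    bLoop N number (f + 1) cnt vis fr =
      (match bScan number fr vis [] with
       | none => (cnt : Int)
       | some vn =>
         match repdigit? N cnt with
         | none => 0
         | some r =>
           if r = number then (cnt : Int)
           else bLoop N number f (cnt + 1)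
             (if r ∈ vn.1 then vn.1 else PySem.Set.add vn.1 r)
             (if r ∈ vn.1 then vn.2 else vn.2 ++ [r])) := rfl

lemma mem_app2 (cand mk : List Int) (v y : Int) :
    y ∈ (if v ∈ cand ∨ v ∈ mk then cand else cand ++ [v]) ↔ y ∈ cand ∨ (y = v ∧ y ∉ mk) := by
  split_ifs with h
  · constructor
    · exact Or.inl
    · rintro (hy | ⟨rfl, hnm⟩)
      · exact hy
      · rcases h with h | h
        · exact h
        · exact absurd h hnm
  · rw [not_or] at h
    simp only [List.mem_append, List.mem_cons, List.not_mem_nil, or_false]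
    constructor
    · rintro (hy | rfl)
      · exact Or.inl hy
      · exact Or.inr ⟨rfl, h.2⟩
    · rintro (hy | ⟨rfl, _⟩)
      · exact Or.inl hy
      · exact Or.inr rfl

lemma mem_app3 (cand mk : List Int) (v y : Int) :
    y ∈ (if v ∈ cand ∨ v ∈ mk ∨ v < 0 then cand else cand ++ [v]) ↔
      y ∈ cand ∨ (y = v ∧ y ∉ mk ∧ 0 ≤ v) := by
  split_ifs with h
  · constructor
    · exact Or.inl
    · rintro (hy | ⟨rfl, hnm, hv⟩)
      · exact hy
      · rcases h with h | h | h
        · exact h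
        · exact absurd h hnm
        · omega
  · rw [not_or, not_or] at h
    simp only [List.mem_append, List.mem_cons, List.not_mem_nil, or_false]
    constructor
    · rintro (hy | rfl)
      · exact Or.inl hy
      · exact Or.inr ⟨rfl, h.2.1, by omega⟩
    · rintro (hy | ⟨rfl, _⟩)
      · exact Or.inl hy
      · exact Or.inr rfl

lemma aScan_none_iff (number : Int) (mk : List Int) :
    ∀ rest cand, aScan number mk rest cand = none ↔ ∃ x ∈ rest, hitB number x := by
  intro rest
  induction rest with
  | nil => intro cand; simp [aScan]
  | cons x rs ih =>
    intro cand
    simp only [aScan]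
    by_cases h1 : x + 5 = number
    · rw [if_pos h1]
      exact ⟨fun _ => ⟨x, by simp, Or.inl h1⟩, fun _ => rfl⟩
    · rw [if_neg h1]
      by_cases h2 : x - 5 = number
      · rw [if_pos h2]
        exact ⟨fun _ => ⟨x, by simp, Or.inr (Or.inl h2)⟩, fun _ => rfl⟩
      · rw [if_neg h2]
        by_cases h3 : x * 5 = number
        · rw [if_pos h3]
          exact ⟨fun _ => ⟨x, by simp, Or.inr (Or.inr (Or.inl h3))⟩, fun _ => rfl⟩
        · rw [if_neg h3]
          by_cases h4 : PySem.Int.floordiv x 5 = number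
          · rw [if_pos h4]
            exact ⟨fun _ => ⟨x, by simp, Or.inr (Or.inr (Or.inr h4))⟩, fun _ => rfl⟩
          · rw [if_neg h4]
            rw [ih]
            constructor
            · rintro ⟨z, hz, hh⟩
              exact ⟨z, List.mem_cons_of_mem _ hz, hh⟩
            · rintro ⟨z, hz, hh⟩
              rcases List.mem_cons.mp hz with rfl | hz
              · exact absurd hh (by unfold hitB; tauto)
              · exact ⟨z, hz, hh⟩

lemma aScan_some_mem (number : Int) (mk : List Int) :
    ∀ rest cand cand', aScan number mk rest cand = some cand' →
      ∀ y, (y ∈ cand' ↔ y ∈ cand ∨ ∃ x ∈ rest, adm x y ∧ y ∉ mk) := by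
  intro rest
  induction rest with
  | nil =>
    intro cand cand' h y
    simp only [aScan, Option.some.injEq] at h
    subst h; simp
  | cons x rs ih =>
    intro cand cand' h y
    simp only [aScan] at h
    by_cases h1 : x + 5 = number
    · rw [if_pos h1] at h; simp at h
    · rw [if_neg h1] at h
      by_cases h2 : x - 5 = number
      · rw [if_pos h2] at h; simp at h
      · rw [if_neg h2] at h
        by_cases h3 : x * 5 = number
        · rw [if_pos h3] at h; simp at h
        · rw [if_neg h3] at h
          by_cases h4 : PySem.Int.floordiv x 5 = number
          · rw [if_pos h4] at h; simp at h
          · rw [if_neg h4] at h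
            rw [ih _ _ h y]
            rw [mem_app2, mem_app2, mem_app3, mem_app2]
            simp only [List.mem_cons, adm]
            constructor
            · rintro (((((hc | hv) | hv) | hv) | hv) | ⟨z, hz, hadm, hnm⟩)
              · exact Or.inl hc
              · exact Or.inr ⟨x, Or.inl rfl, by tauto⟩
              · exact Or.inr ⟨x, Or.inl rfl, by tauto⟩
              · exact Or.inr ⟨x, Or.inl rfl, by tauto⟩
              · exact Or.inr ⟨x, Or.inl rfl, by tauto⟩
              · exact Or.inr ⟨z, Or.inr hz, hadm, hnm⟩
            · rintro (hc | ⟨z, rfl | hz, hadm, hnm⟩)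
              · exact Or.inl (Or.inl (Or.inl (Or.inl (Or.inl hc))))
              · rcases hadm with hv | hv | hv | ⟨hv, hge⟩
                · exact Or.inl (Or.inl (Or.inl (Or.inl (Or.inr ⟨hv, hnm⟩))))
                · exact Or.inl (Or.inl (Or.inr ⟨hv, hnm⟩))
                · exact Or.inl (Or.inr ⟨hv, hnm⟩)
                · exact Or.inl (Or.inl (Or.inl (Or.inr ⟨hv, hnm, hge⟩)))
              · exact Or.inr ⟨z, hz, hadm, hnm⟩

lemma mem_set_add (s : PySem.Set Int) (v y : Int) :
    y ∈ PySem.Set.add s v ↔ y ∈ s ∨ y = v := by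
  simp only [PySem.Set.mem_add]

lemma bGrow_foldl (ys : List Int) :
    ∀ (vis : PySem.Set Int) (nxt : List Int) (y' : Int),
      (y' ∈ (ys.foldl bGrow (vis, nxt)).1 ↔ y' ∈ vis ∨ y' ∈ ys) ∧
      (y' ∈ (ys.foldl bGrow (vis, nxt)).2 ↔ y' ∈ nxt ∨ (y' ∈ ys ∧ y' ∉ vis)) := by
  induction ys with
  | nil => intro vis nxt y'; simp
  | cons z zs ih =>
    intro vis nxt y'
    simp only [List.foldl_cons, bGrow]
    by_cases hz : z ∈ vis
    · simp only [if_pos hz]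
      obtain ⟨i1, i2⟩ := ih vis nxt y'
      refine ⟨?_, ?_⟩
      · rw [i1]
        simp only [List.mem_cons]
        constructor
        · tauto
        · rintro (hv | rfl | hzs) <;> tauto
      · rw [i2]
        simp only [List.mem_cons]
        constructor
        · tauto
        · rintro (hn | ⟨rfl | hzs, hnv⟩) <;> tauto
    · simp only [if_neg hz]
      obtain ⟨i1, i2⟩ := ih (PySem.Set.add vis z) (nxt ++ [z]) y'
      refine ⟨?_, ?_⟩
      · rw [i1, mem_set_add]
        simp only [List.mem_cons]
        tauto
      · rw [i2, mem_set_add]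
        simp only [List.mem_append, List.mem_cons, List.not_mem_nil, or_false]
        constructor
        · rintro ((hn | rfl) | ⟨hzs, hnv⟩) <;> tauto
        · rintro (hn | ⟨rfl | hzs, hnv⟩) <;> tauto

lemma bScan_none_iff (number : Int) :
    ∀ frontier (vis : PySem.Set Int) nxt,
      bScan number frontier vis nxt = none ↔ ∃ x ∈ frontier, hitB number x := by
  intro frontier
  induction frontier with
  | nil => intro vis nxt; simp [bScan]
  | cons x xs ih =>
    intro vis nxt
    simp only [bScan]
    by_cases h : number = x + 5 ∨ number = x - 5 ∨ number = x * 5 ∨ number = PySem.Int.floordiv x 5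
    · rw [if_pos h]
      refine ⟨fun _ => ⟨x, by simp, ?_⟩, fun _ => rfl⟩
      unfold hitB
      rcases h with h | h | h | h
      · exact Or.inl h.symm
      · exact Or.inr (Or.inl h.symm)
      · exact Or.inr (Or.inr (Or.inl h.symm))
      · exact Or.inr (Or.inr (Or.inr h.symm))
    · rw [if_neg h]
      rw [ih]
      constructor
      · rintro ⟨z, hz, hh⟩
        exact ⟨z, List.mem_cons_of_mem _ hz, hh⟩
      · rintro ⟨z, hz, hh⟩
        rcases List.mem_cons.mp hz with rfl | hz
        · refine absurd ?_ h
          rcases hh with hh | hh | hh | hh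
          · exact Or.inl hh.symm
          · exact Or.inr (Or.inl hh.symm)
          · exact Or.inr (Or.inr (Or.inl hh.symm))
          · exact Or.inr (Or.inr (Or.inr hh.symm))
        · exact ⟨z, hz, hh⟩

lemma adm_of_e (x y : Int) (h : y = x + 5 ∨ y = x * 5 ∨ y = PySem.Int.floordiv x 5) :
    adm x y := by
  unfold adm
  tauto

lemma adm_minus (x y : Int) (h : y = x - 5) (hge : 0 ≤ x - 5) : adm x y :=
  Or.inr (Or.inr (Or.inr ⟨h, hge⟩))

lemma adm_cases (x y : Int) (h : adm x y) :
    (y = x + 5 ∨ y = x * 5 ∨ y = PySem.Int.floordiv x 5) ∨ (y = x - 5 ∧ 0 ≤ x - 5) := by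
  unfold adm at h
  tauto

lemma bScan_some_mem (number : Int) :
    ∀ frontier (vis : PySem.Set Int) nxt vn, bScan number frontier vis nxt = some vn →
      ∀ y, (y ∈ vn.1 ↔ y ∈ vis ∨ ∃ x ∈ frontier, adm x y) ∧
           (y ∈ vn.2 ↔ y ∈ nxt ∨ ((∃ x ∈ frontier, adm x y) ∧ y ∉ vis)) := by
  intro frontier
  induction frontier with
  | nil =>
    intro vis nxt vn h y
    simp only [bScan, Option.some.injEq] at h
    subst h; simp
  | cons x xs ih =>
    intro vis nxt vn h y
    simp only [bScan] at h
    by_cases hhit : number = x + 5 ∨ number = x - 5 ∨ number = x * 5 ∨ number = PySem.Int.floordiv x 5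
    · rw [if_pos hhit] at h; simp at h
    · rw [if_neg hhit] at h
      obtain ⟨⟨sv, sn⟩, hs⟩ : ∃ p : PySem.Set Int × List Int,
          [x + 5, x * 5, PySem.Int.floordiv x 5].foldl bGrow (vis, nxt) = p := ⟨_, rfl⟩
      rw [hs] at h
      have hf : ∀ z : Int,
          (z ∈ sv ↔ z ∈ vis ∨ (z = x + 5 ∨ z = x * 5 ∨ z = PySem.Int.floordiv x 5)) ∧
          (z ∈ sn ↔ z ∈ nxt ∨ ((z = x + 5 ∨ z = x * 5 ∨ z = PySem.Int.floordiv x 5) ∧ z ∉ vis)) := by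
        intro z
        have hb := bGrow_foldl [x + 5, x * 5, PySem.Int.floordiv x 5] vis nxt z
        rw [hs] at hb
        simpa only [List.mem_cons, List.not_mem_nil, or_false] using hb
      clear hs
      have hcons1 : (∃ x' ∈ x :: xs, adm x' y) ↔ adm x y ∨ ∃ x' ∈ xs, adm x' y := by
        constructor
        · rintro ⟨z, hz, hp⟩
          rcases List.mem_cons.mp hz with rfl | hz
          · exact Or.inl hp
          · exact Or.inr ⟨z, hz, hp⟩
        · rintro (hp | ⟨z, hz, hp⟩)
          · exact ⟨x, by simp, hp⟩
          · exact ⟨z, List.mem_cons_of_mem _ hz, hp⟩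
      by_cases hc : 0 ≤ x - 5 ∧ x - 5 ∉ sv
      · rw [if_pos hc] at h
        obtain ⟨hge, hnm⟩ := hc
        rw [(hf (x - 5)).1] at hnm
        dsimp only at h
        obtain ⟨c1, c2⟩ := ih _ _ _ h y
        constructor
        · rw [c1, mem_set_add, (hf y).1, hcons1]
          constructor
          · rintro (((hy | hE) | hm) | hq)
            · exact Or.inl hy
            · exact Or.inr (Or.inl (adm_of_e x y hE))
            · exact Or.inr (Or.inl (adm_minus x y hm hge))
            · exact Or.inr (Or.inr hq)
          · rintro (hy | hadm | hq)
            · exact Or.inl (Or.inl (Or.inl hy))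
            · rcases adm_cases x y hadm with hE | ⟨hm, _⟩
              · exact Or.inl (Or.inl (Or.inr hE))
              · exact Or.inl (Or.inr hm)
            · exact Or.inr hq
        · rw [c2, hcons1]
          simp only [List.mem_append, List.mem_singleton]
          rw [mem_set_add, (hf y).2, (hf y).1]
          constructor
          · rintro (((hn | ⟨hE, hnv⟩) | rfl) | ⟨hq, hn2⟩)
            · exact Or.inl hn
            · exact Or.inr ⟨Or.inl (adm_of_e x y hE), hnv⟩
            · exact Or.inr ⟨Or.inl (adm_minus x _ rfl hge), fun hv => hnm (Or.inl hv)⟩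
            · exact Or.inr ⟨Or.inr hq, fun hv => hn2 (Or.inl (Or.inl hv))⟩
          · rintro (hn | ⟨hadm | hq, hnv⟩)
            · exact Or.inl (Or.inl (Or.inl hn))
            · rcases adm_cases x y hadm with hE | ⟨rfl, _⟩
              · exact Or.inl (Or.inl (Or.inr ⟨hE, hnv⟩))
              · exact Or.inl (Or.inr rfl)
            · by_cases hE : y = x + 5 ∨ y = x * 5 ∨ y = PySem.Int.floordiv x 5
              · exact Or.inl (Or.inl (Or.inr ⟨hE, hnv⟩))
              · by_cases hm : y = x - 5
                · exact Or.inl (Or.inr hm)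
                · refine Or.inr ⟨hq, ?_⟩
                  rintro ((hv | hE2) | hm2)
                  · exact hnv hv
                  · exact hE hE2
                  · exact hm hm2
      · rw [if_neg hc] at h
        dsimp only at h
        obtain ⟨c1, c2⟩ := ih _ _ _ h y
        have hc' := not_and_or.mp hc
        rw [not_not, (hf (x - 5)).1] at hc'
        constructor
        · rw [c1, (hf y).1, hcons1]
          constructor
          · rintro ((hy | hE) | hq)
            · exact Or.inl hy
            · exact Or.inr (Or.inl (adm_of_e x y hE))
            · exact Or.inr (Or.inr hq)
          · rintro (hy | hadm | hq)
            · exact Or.inl (Or.inl hy)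
            · rcases adm_cases x y hadm with hE | ⟨rfl, hge⟩
              · exact Or.inl (Or.inr hE)
              · rcases hc' with h2 | h2
                · exact absurd hge h2
                · exact Or.inl h2
            · exact Or.inr hq
        · rw [c2, hcons1, (hf y).2, (hf y).1]
          constructor
          · rintro ((hn | ⟨hE, hnv⟩) | ⟨hq, hn2⟩)
            · exact Or.inl hn
            · exact Or.inr ⟨Or.inl (adm_of_e x y hE), hnv⟩
            · exact Or.inr ⟨Or.inr hq, fun hv => hn2 (Or.inl hv)⟩
          · rintro (hn | ⟨hadm | hq, hnv⟩)
            · exact Or.inl (Or.inl hn)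
            · rcases adm_cases x y hadm with hE | ⟨rfl, hge⟩
              · exact Or.inl (Or.inr ⟨hE, hnv⟩)
              · rcases hc' with h2 | h2
                · exact absurd hge h2
                · rcases h2 with h2 | h2
                  · exact absurd h2 hnv
                  · exact Or.inl (Or.inr ⟨h2, hnv⟩)
            · by_cases hE : y = x + 5 ∨ y = x * 5 ∨ y = PySem.Int.floordiv x 5
              · exact Or.inl (Or.inr ⟨hE, hnv⟩)
              · refine Or.inr ⟨hq, ?_⟩
                rintro (hv | hE2)
                · exact hnv hv
                · exact hE hE2

lemma loop_eq (N number : Int) :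
    ∀ fuel cnt mk (vis : PySem.Set Int) fr, StInv number mk vis fr →
      aLoop N number fuel cnt mk = bLoop N number fuel cnt vis fr := by
  intro fuel
  induction fuel with
  | zero => intro cnt mk vis fr _; rfl
  | succ f ih =>
    intro cnt mk vis fr hInv
    obtain ⟨h1, h2, h3⟩ := hInv
    have hagree : (aScan number mk mk [] = none) ↔ (bScan number fr vis [] = none) := by
      rw [aScan_none_iff, bScan_none_iff]
      constructor
      · rintro ⟨x, hx, hh⟩
        have hv := (h1 x).1 hx
        by_cases hf : x ∈ fr
        · exact ⟨x, hf, hh⟩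
        · exact absurd hh (h3 x hv hf).1
      · rintro ⟨x, hx, hh⟩
        exact ⟨x, (h1 x).2 (h2 x hx), hh⟩
    rw [aLoop_succ, bLoop_succ]
    cases hA : aScan number mk mk [] with
    | none => rw [hagree.mp hA]
    | some cand =>
      have hBex : ∃ vn, bScan number fr vis [] = some vn := by
        cases hBs : bScan number fr vis [] with
        | none =>
          rw [hagree.mpr hBs] at hA
          simp at hA
        | some vn => exact ⟨vn, rfl⟩
      obtain ⟨vn, hB⟩ := hBex
      rw [hB]
      dsimp only
      cases hr : repdigit? N cnt with
      | none => rfl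
      | some r =>
        dsimp only
        by_cases hrn : r = number
        · simp only [if_pos hrn]
        · simp only [if_neg hrn]
          apply ih
          have hCA := aScan_some_mem number mk mk [] cand hA
          have hCB := bScan_some_mem number fr vis [] vn hB
          have hnohit : ∀ x ∈ fr, ¬ hitB number x := by
            intro x hx hh
            have hn : bScan number fr vis [] = none := (bScan_none_iff number fr vis []).2 ⟨x, hx, hh⟩
            rw [hB] at hn
            simp at hn
          have hv2 : ∀ y : Int,
              (y ∈ (if r ∈ vn.1 then vn.1 else PySem.Set.add vn.1 r) ↔ y ∈ vn.1 ∨ y = r) := by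
            intro y
            by_cases hrv : r ∈ vn.1
            · rw [if_pos hrv]
              constructor
              · exact Or.inl
              · rintro (hy | rfl)
                · exact hy
                · exact hrv
            · rw [if_neg hrv]
              exact mem_set_add _ _ _
          have hf2 : ∀ y : Int,
              (y ∈ (if r ∈ vn.1 then vn.2 else vn.2 ++ [r]) ↔ y ∈ vn.2 ∨ (y = r ∧ r ∉ vn.1)) := by
            intro y
            by_cases hrv : r ∈ vn.1
            · rw [if_pos hrv]
              constructor
              · exact Or.inl
              · rintro (hy | ⟨rfl, hc⟩)
                · exact hy
                · exact absurd hrv hc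
            · rw [if_neg hrv]
              simp only [List.mem_append, List.mem_cons, List.not_mem_nil, or_false]
              constructor
              · rintro (hy | rfl)
                · exact Or.inl hy
                · exact Or.inr ⟨rfl, hrv⟩
              · rintro (hy | ⟨rfl, _⟩)
                · exact Or.inl hy
                · exact Or.inr rfl
          have hkey : ∀ y : Int, (y ∈ mk ∨ y ∈ cand) ↔ y ∈ vn.1 := by
            intro y
            rw [hCA y]
            simp only [List.not_mem_nil, false_or]
            rw [(hCB y).1]
            constructor
            · rintro (hy | ⟨z, hz, hadm, hnm⟩)
              · exact Or.inl ((h1 y).1 hy)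
              · have hzv := (h1 z).1 hz
                by_cases hzf : z ∈ fr
                · exact Or.inr ⟨z, hzf, hadm⟩
                · exact absurd ((h3 z hzv hzf).2 y hadm) (fun hv => hnm ((h1 y).2 hv))
            · rintro (hy | ⟨z, hz, hadm⟩)
              · exact Or.inl ((h1 y).2 hy)
              · by_cases hym : y ∈ mk
                · exact Or.inl hym
                · exact Or.inr ⟨z, (h1 z).2 (h2 z hz), hadm, hym⟩
          refine ⟨?_, ?_, ?_⟩
          · intro y
            rw [hv2 y]
            simp only [List.mem_append, List.mem_cons, List.not_mem_nil, or_false]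
            constructor
            · rintro (hy | hy | rfl)
              · exact Or.inl ((hkey y).1 (Or.inl hy))
              · exact Or.inl ((hkey y).1 (Or.inr hy))
              · exact Or.inr rfl
            · rintro (hy | rfl)
              · rcases (hkey y).2 hy with hy | hy
                · exact Or.inl hy
                · exact Or.inr (Or.inl hy)
              · exact Or.inr (Or.inr rfl)
          · intro y hy
            rw [hf2 y] at hy
            rw [hv2 y]
            rcases hy with hy | ⟨rfl, _⟩
            · rcases (hCB y).2.mp hy with h0 | ⟨⟨z, hz, hadm⟩, _⟩
              · simp at h0
              · exact Or.inl ((hCB y).1.mpr (Or.inr ⟨z, hz, hadm⟩))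
            · exact Or.inr rfl
          · intro x hx hfx
            rw [hv2 x] at hx
            rw [hf2 x] at hfx
            rw [not_or] at hfx
            obtain ⟨hfx1, hfx2⟩ := hfx
            have hxv1 : x ∈ vn.1 := by
              rcases hx with hx | rfl
              · exact hx
              · by_cases hrv : x ∈ vn.1
                · exact hrv
                · exact absurd ⟨rfl, hrv⟩ hfx2
            by_cases hxvis : x ∈ vis
            · by_cases hxf : x ∈ fr
              · refine ⟨hnohit x hxf, ?_⟩
                intro y hy
                rw [hv2 y]
                exact Or.inl ((hCB y).1.mpr (Or.inr ⟨x, hxf, hy⟩))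
              · obtain ⟨hh, hcl⟩ := h3 x hxvis hxf
                refine ⟨hh, ?_⟩
                intro y hy
                rw [hv2 y]
                exact Or.inl ((hCB y).1.mpr (Or.inl (hcl y hy)))
            · rcases (hCB x).1.mp hxv1 with hxv | ⟨z, hz, hadm⟩
              · exact absurd hxv hxvis
              · exact absurd ((hCB x).2.mpr (Or.inr ⟨⟨z, hz, hadm⟩, hxvis⟩)) hfx1

lemma StInv_init (number : Int) : StInv number [5] (PySem.Set.ofList [5]) [5] := by
  refine ⟨?_, ?_, ?_⟩
  · intro y
    simp [PySem.Set.ofList]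
  · intro y hy
    simpa [PySem.Set.ofList] using hy
  · intro x hx hfx
    exact absurd (by simpa [PySem.Set.ofList] using hx) hfx

-- ===== VERDICT (by name: the statement is the Claim_ definition above) =====
theorem solution_spec : Claim_equal_solution := by
  intro N number _ _
  unfold Spec_solution solution solution_alt
  exact loop_eq N number 8 1 [5] (PySem.Set.ofList [5]) [5] (StInv_init number)
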